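-- pv_equiv track=rewrite | github.com/blind-peer-review/vocabex | code/src/vocabex/context.py | transpose_ctx_terms_to_docs_locations
-- ===== SOURCE A (Python) =====
-- def transpose_ctx_terms_to_docs_locations(
--         ctxs_locs_by_terms,
--         terms_count,
--         docs_count,
-- ):
--     ctxs_locs_by_docs = [{} for _ in range(docs_count)]
--     for t_index, t in enumerate(ctxs_locs_by_terms):
--         for c_key, c_value in t.items():
--             for d_index, d in enumerate(c_value):
--                 if len(d):
--                     ctxs_locs_by_docs[d_index].setdefault(
--                         c_key,  # get value for key
--                         [[] for _ in range(terms_count)]  # value if missing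
--                     )[t_index] = d
--     # Note: d = doc, c = context word, t = term
--     return ctxs_locs_by_docs
-- ===== SOURCE B (Python) =====
-- def transpose_ctx_terms_to_docs_locations(
--         ctxs_locs_by_terms,
--         terms_count,
--         docs_count,
-- ):
--     # Document-major traversal: build each document's dict independently,
--     # looking up this document's slot in every context's doc list.
--     result = []
--     for d_index in range(docs_count):
--         doc = {}
--         for t_index, t in enumerate(ctxs_locs_by_terms):
--             for c_key, c_value in t.items():
--                 if d_index < len(c_value):
--                     d = c_value[d_index]
--                     if d:
--                         cell = doc.get(c_key)
--                         if cell is None: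
--                             cell = [[] for _ in range(terms_count)]
--                             doc[c_key] = cell
--                         cell[t_index] = d
--         result.append(doc)
--     return result
-- ===== Notes on version B (the rewrite author's own statement) =====
-- stated objective: alternative
-- what changed: B traverses document-major (one pass per document index, looking up that document's slot in each context's list and building each per-document dict independently) instead of A's term-major pass that updates all document dicts held in a shared list.
import Mathlib
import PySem

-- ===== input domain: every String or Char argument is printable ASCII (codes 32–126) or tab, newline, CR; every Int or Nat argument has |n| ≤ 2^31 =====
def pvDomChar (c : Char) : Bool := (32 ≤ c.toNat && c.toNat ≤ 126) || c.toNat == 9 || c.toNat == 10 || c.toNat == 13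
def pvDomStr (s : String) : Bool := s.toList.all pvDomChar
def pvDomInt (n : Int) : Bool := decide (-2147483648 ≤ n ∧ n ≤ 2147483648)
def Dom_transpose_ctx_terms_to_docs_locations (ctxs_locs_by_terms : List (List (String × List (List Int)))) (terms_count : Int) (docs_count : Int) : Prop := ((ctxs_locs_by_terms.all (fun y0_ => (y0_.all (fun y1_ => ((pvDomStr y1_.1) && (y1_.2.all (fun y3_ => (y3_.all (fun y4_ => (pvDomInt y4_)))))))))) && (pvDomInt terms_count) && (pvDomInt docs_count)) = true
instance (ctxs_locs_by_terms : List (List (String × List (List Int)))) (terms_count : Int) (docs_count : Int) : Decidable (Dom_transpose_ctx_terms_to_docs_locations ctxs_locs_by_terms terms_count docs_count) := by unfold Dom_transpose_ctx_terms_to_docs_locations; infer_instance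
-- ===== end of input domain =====

-- B re-implements the transpose document-major (one independent per-document pass) instead of
-- A's term-major pass over a shared list of document dicts; objective: alternative (same result,
-- genuinely different traversal). Equivalence of RETURN values is what is proved.

abbrev PvDoc := PySem.Dict String (List (List Int))

-- ===== PORT A =====
-- innermost loop body: 'if len(d): ctxs_locs_by_docs[d_index].setdefault(c_key, skeleton)[t_index] = d'
-- (setdefault-then-item-assign is exactly Dict.modify; list indices from enumerate are ≥ 0, so .toNat is exact)
def pvA3 (tc ti : Int) (k : String) (docs : List PvDoc) (q : Int × List Int) : List PvDoc :=
  if q.2.length ≠ 0 then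
    docs.modify q.1.toNat
      (fun m => m.modify k (List.replicate tc.toNat ([] : List Int)) (fun v => v.set ti.toNat q.2))
  else docs

-- 'for d_index, d in enumerate(c_value): …'
def pvA2 (tc ti : Int) (docs : List PvDoc) (kv : String × List (List Int)) : List PvDoc :=
  (PySem.List.enumerate kv.2 0).foldl (pvA3 tc ti kv.1) docs

-- 'for c_key, c_value in t.items(): …'
def pvA1 (tc : Int) (docs : List PvDoc) (p : Int × List (String × List (List Int))) : List PvDoc :=
  p.2.foldl (pvA2 tc p.1) docs

def transpose_ctx_terms_to_docs_locations (ctxs_locs_by_terms : List (List (String × List (List Int)))) (terms_count : Int) (docs_count : Int) : List (List (String × List (List Int))) :=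
  (((PySem.List.enumerate ctxs_locs_by_terms 0).foldl (pvA1 terms_count)
      (List.replicate docs_count.toNat (PySem.Dict.empty : PvDoc))).map PySem.Dict.items)

-- ===== PORT B =====
-- 'cell = doc.get(c_key); if cell is None: cell = skeleton; doc[c_key] = cell; cell[t_index] = d'
def pvUpd (tc ti : Int) (k : String) (d : List Int) (doc : PvDoc) : PvDoc :=
  match doc.get? k with
  | some cell => doc.insert k (cell.set ti.toNat d)
  | none => doc.insert k ((List.replicate tc.toNat ([] : List Int)).set ti.toNat d)

-- 'if d_index < len(c_value): d = c_value[d_index]; if d: …'  (the in-range Nat access kv.2[di]? is the bounds check + access)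
def pvB3 (tc ti : Int) (di : Nat) (doc : PvDoc) (kv : String × List (List Int)) : PvDoc :=
  match kv.2[di]? with
  | some d => if d.length ≠ 0 then pvUpd tc ti kv.1 d doc else doc
  | none => doc

-- 'for c_key, c_value in t.items(): …'
def pvB2 (tc : Int) (di : Nat) (doc : PvDoc) (p : Int × List (String × List (List Int))) : PvDoc :=
  p.2.foldl (pvB3 tc p.1 di) doc

def transpose_ctx_terms_to_docs_locations_alt (ctxs_locs_by_terms : List (List (String × List (List Int)))) (terms_count : Int) (docs_count : Int) : List (List (String × List (List Int))) :=
  (List.range docs_count.toNat).map (fun di =>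
    ((PySem.List.enumerate ctxs_locs_by_terms 0).foldl (pvB2 terms_count di)
      (PySem.Dict.empty : PvDoc)).items)

-- ===== PRECONDITION & SPEC =====
-- Pre_ excludes exactly the inputs on which Python A raises IndexError: a non-empty location
-- list at a document index ≥ docs_count, or under a term index ≥ terms_count.
def Pre_transpose_ctx_terms_to_docs_locations (ctxs_locs_by_terms : List (List (String × List (List Int)))) (terms_count : Int) (docs_count : Int) : Prop :=
  ∀ p ∈ PySem.List.enumerate ctxs_locs_by_terms 0, ∀ kv ∈ p.2,
    ∀ q ∈ PySem.List.enumerate kv.2 0, q.2 ≠ [] → q.1 < docs_count ∧ p.1 < terms_count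
instance (ctxs_locs_by_terms : List (List (String × List (List Int)))) (terms_count : Int) (docs_count : Int) : Decidable (Pre_transpose_ctx_terms_to_docs_locations ctxs_locs_by_terms terms_count docs_count) := by unfold Pre_transpose_ctx_terms_to_docs_locations; infer_instance

def pvWitness_transpose_ctx_terms_to_docs_locations : (List (List (String × List (List Int)))) × Int × Int :=
  ([[("a", [[1], []]), ("b", [[], [2, 3]])], [("a", [[4]])]], 2, 2)

def Spec_transpose_ctx_terms_to_docs_locations (ctxs_locs_by_terms : List (List (String × List (List Int)))) (terms_count : Int) (docs_count : Int) (out : List (List (String × List (List Int)))) : Prop := out = transpose_ctx_terms_to_docs_locations_alt ctxs_locs_by_terms terms_count docs_count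
instance (ctxs_locs_by_terms : List (List (String × List (List Int)))) (terms_count : Int) (docs_count : Int) (out : List (List (String × List (List Int)))) : Decidable (Spec_transpose_ctx_terms_to_docs_locations ctxs_locs_by_terms terms_count docs_count out) := by unfold Spec_transpose_ctx_terms_to_docs_locations; infer_instance

-- ===== CLAIM (what is proved, stated in full; the proofs are below) =====
def Claim_equal_transpose_ctx_terms_to_docs_locations : Prop := ∀ (ctxs_locs_by_terms : List (List (String × List (List Int)))) (terms_count : Int) (docs_count : Int), Dom_transpose_ctx_terms_to_docs_locations ctxs_locs_by_terms terms_count docs_count → Pre_transpose_ctx_terms_to_docs_locations ctxs_locs_by_terms terms_count docs_count → Spec_transpose_ctx_terms_to_docs_locations ctxs_locs_by_terms terms_count docs_count (transpose_ctx_terms_to_docs_locations ctxs_locs_by_terms terms_count docs_count)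

-- ===== LEMMAS AND PROOFS =====

-- A's 'setdefault(k, skeleton)[i] = d' (Dict.modify) is B's get?/insert update.
theorem pvUpd_eq_modify (tc ti : Int) (k : String) (d : List Int) (doc : PvDoc) :
    doc.modify k (List.replicate tc.toNat ([] : List Int)) (fun v => v.set ti.toNat d)
      = pvUpd tc ti k d doc := by
  cases h : doc.get? k with
  | some cell => simp [PySem.Dict.modify, pvUpd, PySem.Dict.getD_eq_get?_getD, h]
  | none => simp [PySem.Dict.modify, pvUpd, PySem.Dict.getD_eq_get?_getD, h]

-- apply an optional entry to one document's dict
def pvApplyOpt (tc ti : Int) (k : String) (od : Option (List Int)) (doc : PvDoc) : PvDoc :=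
  match od with
  | some d => if d.length ≠ 0 then pvUpd tc ti k d doc else doc
  | none => doc

-- innermost loop, pointwise: position j of the list of docs evolves by the (at most one)
-- entry of c_value that targets document j
theorem pvA3_pointwise (tc ti : Int) (k : String) (cv : List (List Int)) :
    ∀ (s : Nat) (docs : List PvDoc) (j : Nat),
      ((PySem.List.enumerate cv (s : Int)).foldl (pvA3 tc ti k) docs)[j]?
        = docs[j]?.map (fun doc => pvApplyOpt tc ti k (if s ≤ j then cv[j - s]? else none) doc) := by
  induction cv with
  | nil =>
      intro s docs j
      cases h : docs[j]? <;> simp [PySem.List.enumerate_nil, pvApplyOpt, h]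
  | cons d cv ih =>
      intro s docs j
      rw [PySem.List.enumerate_cons]
      have hs : (s : Int) + 1 = ((s + 1 : Nat) : Int) := by push_cast; ring
      rw [List.foldl_cons, hs, ih (s + 1)]
      have hstep : (pvA3 tc ti k docs ((s : Int), d))[j]?
          = docs[j]?.map (fun doc =>
              if s = j ∧ d.length ≠ 0
              then doc.modify k (List.replicate tc.toNat ([] : List Int))
                     (fun v => v.set ti.toNat d)
              else doc) := by
        unfold pvA3
        by_cases hd : d.length ≠ 0
        · rw [if_pos hd]
          have hts : ((s : Int)).toNat = s := Int.toNat_natCast s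
          rw [hts, List.getElem?_modify]
          cases h : docs[j]? with
          | none => simp
          | some doc =>
              by_cases hsj : s = j <;> simp [hsj, hd]
        · rw [if_neg hd]
          cases h : docs[j]? with
          | none => simp
          | some doc => simp [hd]
      rw [hstep]
      cases h : docs[j]? with
      | none => simp
      | some doc =>
          simp only [Option.map_some]
          by_cases hj : j = s
          · subst hj
            have h1 : ¬ (j + 1 ≤ j) := by omega
            simp only [if_neg h1, if_pos (le_refl j), Nat.sub_self, List.getElem?_cons_zero]
            by_cases hd : d.length ≠ 0 <;>
              simp [pvApplyOpt, hd, pvUpd_eq_modify]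
          · have hcond : ¬ (s = j ∧ d.length ≠ 0) := fun hc => hj hc.1.symm
            by_cases hle : s ≤ j
            · have h2 : (d :: cv)[j - s]? = cv[j - (s + 1)]? := by
                have : j - s = (j - (s + 1)) + 1 := by omega
                rw [this, List.getElem?_cons_succ]
              simp only [h2]
              rw [if_pos (show s + 1 ≤ j by omega), if_pos hle, if_neg hcond]
            · rw [if_neg (show ¬ s + 1 ≤ j by omega), if_neg hle, if_neg hcond]

-- middle loop (one term's contexts), pointwise
theorem pvA2_pointwise (tc ti : Int) (t : List (String × List (List Int))) :
    ∀ (docs : List PvDoc) (j : Nat),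
      (t.foldl (pvA2 tc ti) docs)[j]?
        = docs[j]?.map (fun doc => t.foldl (pvB3 tc ti j) doc) := by
  induction t with
  | nil => intro docs j; cases h : docs[j]? <;> simp [h]
  | cons kv t ih =>
      intro docs j
      rw [List.foldl_cons, ih]
      have h3 := pvA3_pointwise tc ti kv.1 kv.2 0 docs j
      simp only [Nat.cast_zero, Nat.zero_le, if_pos, Nat.sub_zero] at h3
      show ((PySem.List.enumerate kv.2 0).foldl (pvA3 tc ti kv.1) docs)[j]?.map _ = _
      rw [h3]
      cases h : docs[j]? with
      | none => simp
      | some doc =>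
          simp only [Option.map_some, List.foldl_cons]
          congr 1

-- outer loop (all terms), pointwise
theorem pvA1_pointwise (tc : Int) (xs : List (List (String × List (List Int)))) :
    ∀ (s : Int) (docs : List PvDoc) (j : Nat),
      ((PySem.List.enumerate xs s).foldl (pvA1 tc) docs)[j]?
        = docs[j]?.map (fun doc => (PySem.List.enumerate xs s).foldl (pvB2 tc j) doc) := by
  induction xs with
  | nil =>
      intro s docs j
      cases h : docs[j]? <;> simp [PySem.List.enumerate_nil, h]
  | cons t xs ih =>
      intro s docs j
      rw [PySem.List.enumerate_cons, List.foldl_cons, ih]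
      show (pvA1 tc docs (s, t))[j]?.map _ = _
      unfold pvA1
      rw [pvA2_pointwise tc s t docs j]
      cases h : docs[j]? with
      | none => simp
      | some doc => simp [pvB2]

-- ===== VERDICT (by name: the statement is the Claim_ definition above) =====
theorem transpose_ctx_terms_to_docs_locations_spec : Claim_equal_transpose_ctx_terms_to_docs_locations := by
  intro xs tc dc _ _
  unfold Spec_transpose_ctx_terms_to_docs_locations
  unfold transpose_ctx_terms_to_docs_locations transpose_ctx_terms_to_docs_locations_alt
  apply List.ext_getElem?
  intro j
  rw [List.getElem?_map, List.getElem?_map,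
    pvA1_pointwise tc xs 0 (List.replicate dc.toNat (PySem.Dict.empty : PvDoc)) j,
    List.getElem?_replicate]
  by_cases hj : j < dc.toNat <;> simp [hj]
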